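-- pv_equiv track=rewrite | github.com/Amanda5172/Python | A2/A227_POKER_HANDS.py | sameval
-- ===== SOURCE A (Python) =====
-- def sameval(j):
--     pairs=[]
--     three=[]
--     four=[]
--     sama=[] #2d array containing all three cases
--
--     for k in range(len(j)):
--         if j[k]==2:
--             pairs.append(k+1)
--         elif j[k]==3:
--             three.append(k+1)
--         elif j[k]==4:
--             four.append(k+1)
--
--     sama.append(pairs)
--     sama.append(three)
--     sama.append(four)
--
--     return sama
-- ===== SOURCE B (Python) =====
-- def sameval(j):
--     return [[i for i, v in enumerate(j, 1) if v == t] for t in (2, 3, 4)]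
-- ===== Notes on version B (the rewrite author's own statement) =====
-- stated objective: simpler
-- what changed: Replaces the single index-driven loop with three mutable accumulators by three independent one-line comprehensions over enumerate(j, 1), one scan per target value 2/3/4.
import Mathlib
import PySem

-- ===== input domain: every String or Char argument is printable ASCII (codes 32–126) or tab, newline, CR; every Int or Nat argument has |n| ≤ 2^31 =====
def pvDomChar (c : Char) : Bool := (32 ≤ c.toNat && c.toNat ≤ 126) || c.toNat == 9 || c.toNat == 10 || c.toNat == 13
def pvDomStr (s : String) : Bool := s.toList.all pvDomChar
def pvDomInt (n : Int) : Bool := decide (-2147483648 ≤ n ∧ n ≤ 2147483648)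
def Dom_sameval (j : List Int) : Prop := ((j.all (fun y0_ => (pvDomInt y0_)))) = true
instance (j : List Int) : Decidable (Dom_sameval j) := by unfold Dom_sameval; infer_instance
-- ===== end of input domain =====

-- B replaces A's single combined loop (three mutable accumulators, index-driven) by three
-- independent comprehensions over enumerate(j, 1), one per target value — simpler, same cost.


-- ===== PORT A =====
-- for k in range(len(j)): if j[k]==2 … elif j[k]==3 … elif j[k]==4 …, on state (pairs, three, four)
def samevalStep (st : List Int × List Int × List Int) (k : Int) (v : Int) :
    List Int × List Int × List Int :=
  if v = 2 then (st.1 ++ [k + 1], st.2.1, st.2.2)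
  else if v = 3 then (st.1, st.2.1 ++ [k + 1], st.2.2)
  else if v = 4 then (st.1, st.2.1, st.2.2 ++ [k + 1])
  else st

def sameval (j : List Int) : List (List Int) :=
  let st := (PySem.List.pyRange 0 (j.length : Int) 1).foldl
      (fun st k => samevalStep st k (PySem.List.pyGetD j k 0)) ([], [], [])
  [st.1, st.2.1, st.2.2]

-- ===== PORT B =====
-- [[i for i, v in enumerate(j, 1) if v == t] for t in (2, 3, 4)]
def sameval_alt (j : List Int) : List (List Int) :=
  [(2 : Int), 3, 4].map (fun t =>
    (PySem.List.enumerate j 1).filterMap (fun p => if p.2 = t then some p.1 else none))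

-- ===== PRECONDITION & SPEC =====
def Spec_sameval (j : List Int) (out : List (List Int)) : Prop := out = sameval_alt j
instance (j : List Int) (out : List (List Int)) : Decidable (Spec_sameval j out) := by unfold Spec_sameval; infer_instance

-- ===== CLAIM (what is proved, stated in full; the proofs are below) =====
def Claim_equal_sameval : Prop := ∀ (j : List Int), Dom_sameval j → Spec_sameval j (sameval j)

-- ===== LEMMAS AND PROOFS =====
def samevalF (j : List Int) (s t : Int) : List Int :=
  (PySem.List.enumerate j s).filterMap (fun p => if p.2 = t then some p.1 else none)

theorem samevalF_cons (x : Int) (j : List Int) (s t : Int) :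
    samevalF (x :: j) s t =
      (if x = t then [s] else []) ++ samevalF j (s + 1) t := by
  simp only [samevalF, PySem.List.enumerate_cons, List.filterMap_cons]
  split_ifs <;> simp

theorem sameval_loop (j : List Int) (s : Int) (p t f : List Int) :
    (PySem.List.enumerate j s).foldl (fun st q => samevalStep st q.1 q.2) (p, t, f)
      = (p ++ samevalF j (s + 1) 2, t ++ samevalF j (s + 1) 3, f ++ samevalF j (s + 1) 4) := by
  induction j generalizing s p t f with
  | nil => simp [samevalF, PySem.List.enumerate_nil]
  | cons x xs ih =>
    rw [PySem.List.enumerate_cons, List.foldl_cons,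
        samevalF_cons, samevalF_cons, samevalF_cons]
    by_cases h2 : x = 2
    · subst h2
      rw [show samevalStep (p, t, f) (s, (2:Int)).1 (s, (2:Int)).2 = (p ++ [s + 1], t, f) from by simp [samevalStep], ih]
      simp
    · by_cases h3 : x = 3
      · subst h3
        rw [show samevalStep (p, t, f) (s, (3:Int)).1 (s, (3:Int)).2 = (p, t ++ [s + 1], f) from by simp [samevalStep], ih]
        simp
      · by_cases h4 : x = 4
        · subst h4
          rw [show samevalStep (p, t, f) (s, (4:Int)).1 (s, (4:Int)).2 = (p, t, f ++ [s + 1]) from by simp [samevalStep], ih]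
          simp
        · rw [show samevalStep (p, t, f) (s, x).1 (s, x).2 = (p, t, f) from by simp [samevalStep, h2, h3, h4], ih]
          simp [h2, h3, h4]

theorem sameval_eq (j : List Int) : sameval j = sameval_alt j := by
  have h1 : (PySem.List.pyRange 0 (j.length : Int) 1).foldl
      (fun st k => samevalStep st k (PySem.List.pyGetD j k 0)) ([], [], [])
      = ([] ++ samevalF j (0 + 1) 2, [] ++ samevalF j (0 + 1) 3, [] ++ samevalF j (0 + 1) 4) := by
    rw [← sameval_loop j 0 [] [] [], PySem.List.enumerate_eq_map_pyRange (d := 0), List.foldl_map]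
    rfl
  unfold sameval
  rw [h1]
  simp [sameval_alt, samevalF]

-- ===== VERDICT (by name: the statement is the Claim_ definition above) =====
theorem sameval_spec : Claim_equal_sameval := by
  intro j _
  unfold Spec_sameval
  exact sameval_eq j
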